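-- pv_equiv track=rewrite | github.com/predicateacademy/physical-computing | lightshow/lightshow_patterns.py | throw_left
-- ===== SOURCE A (Python) =====
-- def on(led):
-- 	patterns = []
-- 	pattern = ''
-- 	for x in range(len(led)):
-- 		pattern += '1'
-- 	patterns.append(pattern)
-- 	return patterns
--
-- def throw_left(led):
--    patterns = []
--    for x in range(len(led)):
--       l = right_left(led)
--       for item in l:
--          for idx in range(x):
--             tlist = list(item)
--             tlist[idx] = '1'
--             item = ''.join(tlist)
--          patterns.append(item)
--    patterns.extend(on(led))
--    return patterns
--
-- def left_right(led):
--    patterns = []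
--    for x in range(len(led)):
--       pattern = ''
--       for y in range(len(led)):
--          if x == y:
--             pattern += '1'
--          else:
--             pattern += '0'
--       patterns.append(pattern)
--    return patterns
--
-- def right_left(led):
--    rt = left_right(led)
--    rt.reverse()
--    return rt
-- ===== SOURCE B (Python) =====
-- def throw_left(led):
--     n = len(led)
--     patterns = [''.join('1' if i < x or i == p else '0' for i in range(n))
--                 for x in range(n) for p in reversed(range(n))]
--     patterns.append('1' * n)
--     return patterns
-- ===== Notes on version B (the rewrite author's own statement) =====
-- stated objective: simpler
-- what changed: B computes each pattern character directly from the predicate (i < x or i == p) in one comprehension, eliminating A's left_right/right_left single-bit table construction, list reversal helper and the in-place prefix-overwrite rebuild loop.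
import Mathlib
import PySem

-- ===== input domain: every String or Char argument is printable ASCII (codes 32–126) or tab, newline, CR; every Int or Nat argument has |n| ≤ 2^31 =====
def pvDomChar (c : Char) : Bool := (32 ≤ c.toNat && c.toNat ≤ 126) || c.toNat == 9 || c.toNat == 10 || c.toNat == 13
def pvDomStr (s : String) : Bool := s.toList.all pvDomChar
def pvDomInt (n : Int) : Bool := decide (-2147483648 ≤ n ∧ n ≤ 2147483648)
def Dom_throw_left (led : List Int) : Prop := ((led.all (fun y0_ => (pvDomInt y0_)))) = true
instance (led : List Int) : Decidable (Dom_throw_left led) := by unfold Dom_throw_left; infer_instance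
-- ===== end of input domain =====

-- B computes each character directly from the predicate (i < x or i == p), removing A's
-- single-bit table construction, reversal and in-place prefix-overwrite passes (objective: simpler).

-- ===== PORT A =====
-- helper: Python `on` (strings kept as List Char, wrapped with String.ofList when stored)
def pv_on (led : List Int) : List String :=
  [String.ofList ((List.range led.length).foldl (fun p _ => p ++ ['1']) [])]

-- helper: Python `left_right`
def pv_left_right (led : List Int) : List (List Char) :=
  (List.range led.length).foldl
    (fun ps x =>
      ps ++ [(List.range led.length).foldl
               (fun p y => p ++ [if x = y then '1' else '0']) []]) []

-- helper: Python `right_left`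
def pv_right_left (led : List Int) : List (List Char) :=
  (pv_left_right led).reverse

def throw_left (led : List Int) : List String :=
  ((List.range led.length).foldl
    (fun ps x =>
      (pv_right_left led).foldl
        (fun ps2 item =>
          ps2 ++ [String.ofList ((List.range x).foldl (fun it idx => it.set idx '1') item)])
        ps)
    []) ++ pv_on led

-- ===== PORT B =====
def throw_left_alt (led : List Int) : List String :=
  let n := led.length
  ((List.range n).flatMap (fun x =>
    ((List.range n).reverse).map (fun p =>
      String.ofList ((List.range n).map (fun i => if i < x ∨ i = p then '1' else '0')))))
  ++ [String.ofList (List.replicate n '1')]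

-- ===== PRECONDITION & SPEC =====
def Spec_throw_left (led : List Int) (out : List String) : Prop := out = throw_left_alt led
instance (led : List Int) (out : List String) : Decidable (Spec_throw_left led out) := by unfold Spec_throw_left; infer_instance

-- ===== CLAIM (what is proved, stated in full; the proofs are below) =====
def Claim_equal_throw_left : Prop := ∀ (led : List Int), Dom_throw_left led → Spec_throw_left led (throw_left led)

-- ===== LEMMAS AND PROOFS =====

theorem foldl_append_one {α β : Type} (f : α → β) :
    ∀ (l : List α) (acc : List β),
      l.foldl (fun ps x => ps ++ [f x]) acc = acc ++ l.map f := by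
  intro l
  induction l with
  | nil => intro acc; simp
  | cons a t ih => intro acc; simp [List.foldl, ih]

theorem left_right_eq (led : List Int) :
    pv_left_right led =
      (List.range led.length).map
        (fun x => (List.range led.length).map (fun y => if x = y then '1' else '0')) := by
  unfold pv_left_right
  rw [foldl_append_one]
  simp only [List.nil_append]
  exact List.map_congr_left (fun x _ => by rw [foldl_append_one]; simp

)

-- overwriting the first x positions with '1'
theorem set_prefix_ones (L : List Char) :
    ∀ (x : ℕ), x ≤ L.length →
      (List.range x).foldl (fun it idx => it.set idx '1') L =
        (List.range L.length).map
          (fun i => if i < x then '1' else L.getD i ' ') := by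
  intro x
  induction x with
  | zero =>
      intro _
      apply List.ext_getElem
      · simp
      · intro i h1 h2
        have h1' : i < L.length := by simpa using h1
        simp [List.getD_eq_getElem?_getD, List.getElem?_eq_getElem h1']
  | succ x ih =>
      intro hx
      rw [List.range_succ, List.foldl_append, ih (Nat.le_of_succ_le hx)]
      apply List.ext_getElem
      · simp
      · intro i h1 h2
        simp only [List.getElem_map, List.getElem_range] at *
        rcases Nat.lt_trichotomy i x with h | h | h
        · simp [h, Nat.lt_succ_of_lt h, Nat.ne_of_gt h]
        · subst h; simp
        · have h1' : ¬ i < x := Nat.not_lt.mpr (Nat.le_of_lt h)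
          have h2' : ¬ i < x + 1 := Nat.not_lt.mpr h
          simp [h1', h2', Nat.ne_of_lt h]

theorem item_eq (n x p : ℕ) (hx : x ≤ n) :
    (List.range x).foldl (fun it idx => it.set idx '1')
        ((List.range n).map (fun y => if p = y then '1' else '0')) =
      (List.range n).map (fun i => if i < x ∨ i = p then '1' else '0') := by
  rw [set_prefix_ones _ x (by simpa using hx)]
  simp only [List.length_map, List.length_range]
  apply List.map_congr_left
  intro i hi
  simp only [List.mem_range] at hi
  by_cases h : i < x
  · simp [h]
  · simp only [h, if_false, false_or]
    rw [List.getD_eq_getElem _ _ (by simpa using hi)]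
    simp only [List.getElem_map, List.getElem_range]
    by_cases hp : i = p
    · simp [hp]
    · simp [hp, Ne.symm hp]

theorem foldl_chunks_congr {α β : Type} (G : α → List β) :
    ∀ (l : List α) (F : List β → α → List β),
      (∀ acc x, x ∈ l → F acc x = acc ++ G x) →
      ∀ acc, l.foldl F acc = acc ++ l.flatMap G := by
  intro l
  induction l with
  | nil => intro F _ acc; simp
  | cons a t ih =>
      intro F h acc
      simp only [List.foldl, List.flatMap_cons]
      rw [h acc a (List.mem_cons_self), ih F (fun acc x hx => h acc x (List.mem_cons_of_mem a hx))]
      simp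

theorem throw_left_eq_alt (led : List Int) : throw_left led = throw_left_alt led := by
  unfold throw_left throw_left_alt pv_right_left pv_on
  rw [left_right_eq, ← List.map_reverse]
  congr 1
  · rw [foldl_chunks_congr
      (fun x => (List.range led.length).reverse.map (fun p =>
        String.ofList ((List.range led.length).map
          (fun i => if i < x ∨ i = p then '1' else '0')))) _ _
      (by
        intro acc x hx
        rw [foldl_append_one, List.map_map]
        congr 1
        apply List.map_congr_left
        intro p _
        simp only [Function.comp]
        rw [item_eq led.length x p (Nat.le_of_lt (List.mem_range.mp hx))]) []]
    simp
  · congr 1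
    rw [foldl_append_one]
    simp [List.map_const']

-- ===== VERDICT (by name: the statement is the Claim_ definition above) =====
theorem throw_left_spec : Claim_equal_throw_left := by
  intro led _
  unfold Spec_throw_left
  exact throw_left_eq_alt led
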